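-- pv_equiv track=rewrite | github.com/Kefka174/leetcode | solutions/decode-string/solution.py | calcRepeatingSubsequence
-- ===== SOURCE A (Python) =====
-- def calcRepeatingSubsequence(s, startingIndex):
--     sequenceList = []
--     i = startingIndex
--
--     while i < len(s) and s[i] != ']':
--         if s[i].isdigit():
--             multVal = 0
--             while s[i].isdigit(): # loop to build multi-digit number
--                 multVal *= 10
--                 multVal += int(s[i])
--                 i += 1
--             seq, i = calcRepeatingSubsequence(s, i + 1)
--             sequenceList += (seq * multVal)
--         else:
--             sequenceList.append(s[i])
--             i += 1
--
--     return sequenceList, i + 1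
-- ===== SOURCE B (Python) =====
-- def calcRepeatingSubsequence(s, startingIndex):
--     # Iterative single-pass decoder: an explicit stack of (saved_list, multiplier)
--     # frames replaces A's recursion; no recursion depth limit.
--     stack = []
--     cur = []
--     i = startingIndex
--     while True:
--         if i < len(s) and s[i] != ']':
--             c = s[i]
--             if c.isdigit():
--                 mult = 0
--                 while i < len(s) and s[i].isdigit():
--                     mult = mult * 10 + int(s[i])
--                     i += 1
--                 stack.append((cur, mult))
--                 cur = []
--                 i += 1  # skip the character after the digits (A's '[' skip)
--             else:
--                 cur.append(c)
--                 i += 1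
--         elif stack:
--             parent, mult = stack.pop()
--             cur = parent + cur * mult
--             i += 1
--         else:
--             return cur, i + 1
-- ===== Notes on version B (the rewrite author's own statement) =====
-- stated objective: faster
-- what changed: A mixes a while-loop with a mutated accumulator and recursion for brackets; B is an iterative single-pass decoder over an explicit stack of (saved_list, multiplier) frames with no recursion, with a bounds-checked digit scan.
import Mathlib
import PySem

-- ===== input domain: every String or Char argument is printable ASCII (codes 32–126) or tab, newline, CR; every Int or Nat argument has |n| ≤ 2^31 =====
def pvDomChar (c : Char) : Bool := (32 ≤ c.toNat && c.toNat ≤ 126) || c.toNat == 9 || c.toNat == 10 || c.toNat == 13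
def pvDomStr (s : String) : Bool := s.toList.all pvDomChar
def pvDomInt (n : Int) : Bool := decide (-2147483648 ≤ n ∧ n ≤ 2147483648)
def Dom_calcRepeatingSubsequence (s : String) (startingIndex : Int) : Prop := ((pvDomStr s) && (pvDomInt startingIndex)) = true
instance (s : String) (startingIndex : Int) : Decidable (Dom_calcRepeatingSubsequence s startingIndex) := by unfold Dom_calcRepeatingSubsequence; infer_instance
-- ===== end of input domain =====

-- B replaces A's recursion by an iterative single-pass decoder over an explicit stack of
-- (saved_list, multiplier) frames; equal return values are proved on Pre_.

-- ===== PORT A =====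
-- A's inner 'while s[i].isdigit()' multi-digit loop; the fuel argument only makes the loop total.
-- 'int(s[i])' is (PySem.Int.ofChars? [c]).getD 0 (exact: c is a digit there).
def pvDigitsA (s : List Char) : Nat → Int → Int → Int × Int
  | 0, mult, i => (mult, i)
  | f+1, mult, i =>
    match PySem.List.pyGet? s i with
    | some c =>
        if PySem.Chars.isdigit c then
          pvDigitsA s f (mult * 10 + (PySem.Int.ofChars? [c]).getD 0) (i + 1)
        else (mult, i)
    | none => (mult, i)   -- Python raises IndexError here; such inputs are outside Pre_

-- A's outer while loop; acc is sequenceList; the recursive call 'calcRepeatingSubsequence(s, i+1)'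
-- is the call with acc = []. The fuel argument f is a totality guard only, threaded through the
-- run (the remaining fuel is returned) so one global budget covers the whole run; d repeats the
-- same guard to make the recursion structural (pvLoopA_depth_irrel below shows d plays no role
-- whenever f ≤ d, which pvLoopA_fuel_le guarantees along the run).
def pvLoopA (s : List Char) : Nat → Nat → Int → List String → (List String × Int) × Nat
  | _, 0, i, acc => ((acc, i + 1), 0)
  | 0, _+1, i, acc => ((acc, i + 1), 0)
  | d+1, f+1, i, acc =>
    if i < (s.length : Int) then
      match PySem.List.pyGet? s i with
      | none => ((acc, i + 1), f)      -- Python raises IndexError (i < -len); outside Pre_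
      | some c =>
        if c = ']' then ((acc, i + 1), f)
        else if PySem.Chars.isdigit c then
          let md := pvDigitsA s (2 * s.length + 1) 0 i
          let r := pvLoopA s d f (md.2 + 1) []
          pvLoopA s d r.2 r.1.2 (acc ++ PySem.List.pyRepeat r.1.1 md.1)
        else
          pvLoopA s d f (i + 1) (acc ++ [String.ofList [c]])
    else ((acc, i + 1), f)

def calcRepeatingSubsequence (s : String) (startingIndex : Int) : List String × Int :=
  (pvLoopA s.toList (4 * s.toList.length + 8) (4 * s.toList.length + 8) startingIndex []).1

-- ===== PORT B =====
-- B's bounds-checked digit scan returning (mult, j).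
def pvScanB (s : List Char) : Nat → Int → Int → Int × Int
  | 0, mult, j => (mult, j)
  | f+1, mult, j =>
    if j < (s.length : Int) then
      match PySem.List.pyGet? s j with
      | some c =>
          if PySem.Chars.isdigit c then
            pvScanB s f (mult * 10 + (PySem.Int.ofChars? [c]).getD 0) (j + 1)
          else (mult, j)
      | none => (mult, j)   -- Python raises IndexError (j < -len); outside Pre_
    else (mult, j)

-- when the scan of the string is over, B only pops remaining frames (its 'elif stack' branch);
-- this is also the out-of-fuel fallback of pvStepB below.
def pvDrainB : Int → List String → List (List String × Int) → List String × Int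
  | i, cur, [] => (cur, i + 1)
  | i, cur, (parent, mult) :: rest => pvDrainB (i + 1) (parent ++ PySem.List.pyRepeat cur mult) rest

-- B's main 'while True' loop over the state (i, cur, stack); fuel is a totality guard only.
def pvStepB (s : List Char) : Nat → Int → List String → List (List String × Int) → List String × Int
  | 0, i, cur, stk => pvDrainB i cur stk
  | f+1, i, cur, stk =>
    if i < (s.length : Int) then
      match PySem.List.pyGet? s i with
      | none =>                        -- Python raises IndexError (i < -len); outside Pre_
          match stk with
          | [] => (cur, i + 1)
          | (parent, mult) :: rest =>
              pvStepB s f (i + 1) (parent ++ PySem.List.pyRepeat cur mult) rest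
      | some c =>
        if c = ']' then
          match stk with
          | [] => (cur, i + 1)
          | (parent, mult) :: rest =>
              pvStepB s f (i + 1) (parent ++ PySem.List.pyRepeat cur mult) rest
        else if PySem.Chars.isdigit c then
          let mj := pvScanB s (2 * s.length + 1) 0 i
          pvStepB s f (mj.2 + 1) [] ((cur, mj.1) :: stk)
        else
          pvStepB s f (i + 1) (cur ++ [String.ofList [c]]) stk
    else
      match stk with
      | [] => (cur, i + 1)
      | (parent, mult) :: rest =>
          pvStepB s f (i + 1) (parent ++ PySem.List.pyRepeat cur mult) rest

def calcRepeatingSubsequence_alt (s : String) (startingIndex : Int) : List String × Int :=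
  pvStepB s.toList (4 * s.toList.length + 8) startingIndex [] []

-- ===== PRECONDITION & SPEC =====
-- Shape scan used by Pre_: a char-by-char state machine over the given character list with a
-- bracket depth and an "inside a digit run" flag; returns true exactly when a digit run extends
-- to the end of the list before the walk stops (a top-level ']' or the end) — that is exactly
-- where A's unguarded 'while s[i].isdigit()' indexes past the end and raises. It tracks only
-- position, depth and that flag — no output is computed.
def pvCrash : List Char → Nat → Bool → Bool
  | [], _, inDig => inDig                -- list ended inside a digit run: A raises IndexError
  | c :: rest, d, true =>
    if PySem.Chars.isdigit c then pvCrash rest d true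
    else pvCrash rest (d + 1) false      -- run over: this char is skipped ('['), one level deeper
  | c :: rest, d, false =>
    if c = ']' then
      match d with
      | 0 => false                       -- top-level ']': A stops here, the rest is never scanned
      | d' + 1 => pvCrash rest d' false
    else if PySem.Chars.isdigit c then pvCrash rest d true
    else pvCrash rest d false

-- the character sequence A actually walks from startingIndex: for an in-range negative start,
-- Python's negative indexing reads the final -startingIndex chars and then the whole string again.
def pvWalk (s : String) (startingIndex : Int) : List Char :=
  if startingIndex < 0 then
    s.toList.drop (s.toList.length + startingIndex).toNat ++ s.toList
  else s.toList.drop startingIndex.toNat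

-- Pre_ excludes exactly the inputs on which A raises IndexError: startingIndex below -len(s)
-- (immediate out-of-range s[i]), or a digit run that A's walk reaches extending to the end of
-- the string (A's inner digit loop indexes past the end). On every other input A returns.
def Pre_calcRepeatingSubsequence (s : String) (startingIndex : Int) : Prop :=
  (s.toList.length : Int) ≤ startingIndex ∨
  (-(s.toList.length : Int) ≤ startingIndex ∧ startingIndex < (s.toList.length : Int) ∧
    pvCrash (pvWalk s startingIndex) 0 false = false)
instance (s : String) (startingIndex : Int) : Decidable (Pre_calcRepeatingSubsequence s startingIndex) := by unfold Pre_calcRepeatingSubsequence; infer_instance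

def pvWitness_calcRepeatingSubsequence : String × Int := ("2a]b", 0)

def Spec_calcRepeatingSubsequence (s : String) (startingIndex : Int) (out : List String × Int) : Prop := out = calcRepeatingSubsequence_alt s startingIndex
instance (s : String) (startingIndex : Int) (out : List String × Int) : Decidable (Spec_calcRepeatingSubsequence s startingIndex out) := by unfold Spec_calcRepeatingSubsequence; infer_instance

-- ===== CLAIM (what is proved, stated in full; the proofs are below) =====
def Claim_equal_calcRepeatingSubsequence : Prop := ∀ (s : String) (startingIndex : Int), Dom_calcRepeatingSubsequence s startingIndex → Pre_calcRepeatingSubsequence s startingIndex → Spec_calcRepeatingSubsequence s startingIndex (calcRepeatingSubsequence s startingIndex)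

-- ===== LEMMAS AND PROOFS =====

-- The two digit scanners agree on every input: where B's extra bound check 'j < len' fails,
-- pyGet? is none and A's scanner stops too.
theorem pvDigitsA_eq_pvScanB (s : List Char) :
    ∀ (f : Nat) (m j : Int), pvDigitsA s f m j = pvScanB s f m j := by
  intro f
  induction f with
  | zero => intro m j; rfl
  | succ f ih =>
    intro m j
    by_cases hj : j < (s.length : Int)
    · cases h : PySem.List.pyGet? s j with
      | none => simp [pvDigitsA, pvScanB, h, hj]
      | some c => simp [pvDigitsA, pvScanB, h, hj, ih]
    · have hnone : PySem.List.pyGet? s j = none := by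
        rw [PySem.List.pyGet?_eq_none_iff]
        intro hr
        exact hj hr.2
      simp [pvDigitsA, pvScanB, hnone, hj]

-- fuel bound: pvLoopA never returns more fuel than it was given
theorem pvLoopA_fuel_le (s : List Char) :
    ∀ (d f : Nat) (i : Int) (acc : List String), (pvLoopA s d f i acc).2 ≤ f := by
  intro d
  induction d with
  | zero => intro f i acc; cases f <;> simp [pvLoopA]
  | succ d ih =>
    intro f i acc
    cases f with
    | zero => simp [pvLoopA]
    | succ f =>
      by_cases hi : i < (s.length : Int)
      · rw [pvLoopA]
        cases h : PySem.List.pyGet? s i with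
        | none => simp [hi, h]
        | some c =>
          by_cases hc : c = ']'
          · simp [hi, h, hc]
          · by_cases hd : PySem.Chars.isdigit c
            · simp only [hi, h, hc, hd]
              simp only [if_pos, if_true, Bool.false_eq_true, if_false, if_neg, not_false_iff]
              have h1 := ih f ((pvDigitsA s (2 * s.length + 1) 0 i).2 + 1) []
              have h2 := ih (pvLoopA s d f ((pvDigitsA s (2 * s.length + 1) 0 i).2 + 1) []).2
                (pvLoopA s d f ((pvDigitsA s (2 * s.length + 1) 0 i).2 + 1) []).1.2
                (acc ++ PySem.List.pyRepeat
                  (pvLoopA s d f ((pvDigitsA s (2 * s.length + 1) 0 i).2 + 1) []).1.1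
                  (pvDigitsA s (2 * s.length + 1) 0 i).1)
              omega
            · simp only [hi, h, hc, hd]
              simp only [if_pos, if_true, Bool.false_eq_true, if_false, if_neg, not_false_iff]
              exact le_trans (ih f (i + 1) (acc ++ [String.ofList [c]])) (by omega)
      · simp [pvLoopA, hi]

-- depth irrelevance: the structural guard d does not affect the result once f ≤ d
theorem pvLoopA_depth_irrel (s : List Char) :
    ∀ (d d' f : Nat) (i : Int) (acc : List String), f ≤ d → f ≤ d' →
      pvLoopA s d f i acc = pvLoopA s d' f i acc := by
  intro d
  induction d with
  | zero =>
    intro d' f i acc hd hd'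
    interval_cases f
    cases d' <;> simp [pvLoopA]
  | succ d ih =>
    intro d' f i acc hd hd'
    cases f with
    | zero => cases d' <;> simp [pvLoopA]
    | succ f =>
      cases d' with
      | zero => omega
      | succ d' =>
        by_cases hi : i < (s.length : Int)
        · rw [pvLoopA, pvLoopA]
          cases h : PySem.List.pyGet? s i with
          | none => simp [hi, h]
          | some c =>
            by_cases hc : c = ']'
            · simp [hi, h, hc]
            · by_cases hdg : PySem.Chars.isdigit c
              · simp only [hi, h, hc, hdg]
                simp only [if_pos, if_true, Bool.false_eq_true, if_false, if_neg, not_false_iff]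
                have hr : pvLoopA s d f ((pvDigitsA s (2 * s.length + 1) 0 i).2 + 1) []
                    = pvLoopA s d' f ((pvDigitsA s (2 * s.length + 1) 0 i).2 + 1) [] :=
                  ih d' f _ _ (by omega) (by omega)
                rw [← hr]
                exact ih d' _ _ _
                  (le_trans (pvLoopA_fuel_le s d f _ _) (by omega))
                  (le_trans (pvLoopA_fuel_le s d f _ _) (by omega))
              · simp only [hi, h, hc, hdg]
                simp only [if_pos, if_true, Bool.false_eq_true, if_false, if_neg, not_false_iff]
                exact ih d' f _ _ (by omega) (by omega)
        · simp [pvLoopA, hi]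

-- A-side resumption of saved frames: finish the current level with pvLoopA (on the remaining
-- fuel), multiply and append into the parent accumulator, resume the parent (proof-side helper).
def pvResumeA (s : List Char) : (List String × Int) × Nat → List (List String × Int) → List String × Int
  | (vj, _), [] => vj
  | (vj, rem), (parent, mult) :: rest =>
      pvResumeA s (pvLoopA s rem rem vj.2 (parent ++ PySem.List.pyRepeat vj.1 mult)) rest

-- with no fuel left, pvLoopA returns immediately, so resuming is exactly pvDrainB
theorem pvResumeA_zero (s : List Char) :
    ∀ (stk : List (List String × Int)) (v : List String) (j : Int),
      pvResumeA s ((v, j + 1), 0) stk = pvDrainB j v stk := by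
  intro stk
  induction stk with
  | nil => intro v j; rfl
  | cons fr rest ih =>
    intro v j
    cases fr with
    | mk parent mult => simpa [pvResumeA, pvLoopA, pvDrainB] using ih _ (j + 1)

-- simulation: B's stack machine from state (i, cur, stk) computes A's current-level loop
-- from i with accumulator cur, then resumes the saved frames on the remaining fuel.
theorem pvStepB_eq_pvResumeA (s : List Char) :
    ∀ (f : Nat) (d : Nat) (i : Int) (cur : List String) (stk : List (List String × Int)),
      f ≤ d → pvStepB s f i cur stk = pvResumeA s (pvLoopA s d f i cur) stk := by
  intro f
  induction f with
  | zero =>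
    intro d i cur stk _
    cases d <;>
      simpa [pvStepB, pvLoopA] using (pvResumeA_zero s stk cur i).symm
  | succ f ih =>
    intro d i cur stk hfd
    cases d with
    | zero => omega
    | succ d =>
      by_cases hi : i < (s.length : Int)
      · cases h : PySem.List.pyGet? s i with
        | none =>
          cases stk with
          | nil => simp [pvStepB, pvLoopA, hi, h, pvResumeA]
          | cons fr rest =>
            cases fr with
            | mk parent mult =>
              simp [pvStepB, pvLoopA, hi, h, pvResumeA, ih f _ _ _ (le_refl f)]
        | some c =>
          by_cases hc : c = ']'
          · cases stk with
            | nil => simp [pvStepB, pvLoopA, hi, h, hc, pvResumeA]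
            | cons fr rest =>
              cases fr with
              | mk parent mult =>
                simp [pvStepB, pvLoopA, hi, h, hc, pvResumeA, ih f _ _ _ (le_refl f)]
          · by_cases hdg : PySem.Chars.isdigit c
            · have hmd := pvDigitsA_eq_pvScanB s (2 * s.length + 1) 0 i
              have hle := pvLoopA_fuel_le s d f ((pvDigitsA s (2 * s.length + 1) 0 i).2 + 1) []
              simp only [pvStepB, pvLoopA, hi, h, hc, hdg, if_pos, if_neg, not_false_iff, if_true,
                Bool.false_eq_true, if_false]
              rw [hmd] at hle ⊢
              rw [ih d _ _ _ (by omega)]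
              simp only [pvResumeA]
              rw [pvLoopA_depth_irrel s
                (pvLoopA s d f ((pvScanB s (2 * s.length + 1) 0 i).2 + 1) []).2 d
                (pvLoopA s d f ((pvScanB s (2 * s.length + 1) 0 i).2 + 1) []).2
                _ _ (le_refl _) (by omega)]
            · simp [pvStepB, pvLoopA, hi, h, hc, hdg, ih d _ _ _ (by omega)]
      · cases stk with
        | nil => simp [pvStepB, pvLoopA, hi, pvResumeA]
        | cons fr rest =>
          cases fr with
          | mk parent mult =>
            simp [pvStepB, pvLoopA, hi, pvResumeA, ih f _ _ _ (le_refl f)]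

-- ===== VERDICT (by name: the statement is the Claim_ definition above) =====
theorem calcRepeatingSubsequence_spec : Claim_equal_calcRepeatingSubsequence := by
  intro s startingIndex _ _
  unfold Spec_calcRepeatingSubsequence calcRepeatingSubsequence calcRepeatingSubsequence_alt
  rw [pvStepB_eq_pvResumeA s.toList _ _ _ _ _ (le_refl _)]
  rfl
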